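-- pv_equiv track=rewrite | github.com/thexant/The-Quiet-End | cogs/creation.py | _convert_services_to_flags
-- ===== SOURCE A (Python) =====
-- def _convert_services_to_flags(service_list: list) -> dict:
--     """Convert service list to database boolean flags"""
--     # Initialize all services as False
--     service_flags = {
--         'has_jobs': False,
--         'has_shops': False,
--         'has_medical': False,
--         'has_repairs': False,
--         'has_fuel': False,
--         'has_upgrades': False,
--         'has_shipyard': False,
--         'has_federal_supplies': False,
--         'has_black_market': False
--     }
--
--     # Map service IDs to database columns
--     service_mapping = {
--         'jobs': 'has_jobs',
--         'shop': 'has_shops',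
--         'medical': 'has_medical',
--         'shipyard': 'has_shipyard',
--         'fuel': 'has_fuel',
--         'cantina': 'has_shops',  # Cantinas are considered shops
--         'housing': 'has_shops'   # Housing services are handled via shops
--     }
--
--     # Set flags for selected services
--     for service_id in service_list:
--         if service_id in service_mapping:
--             service_flags[service_mapping[service_id]] = True
--
--     # Auto-enable repairs if shipyard is enabled
--     if service_flags['has_shipyard']:
--         service_flags['has_repairs'] = True
--         service_flags['has_upgrades'] = True
--
--     return service_flags
-- ===== SOURCE B (Python) =====
-- def _convert_services_to_flags(service_list: list) -> dict:
--     """Convert service list to database boolean flags"""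
--     services = set(service_list)
--     has_shipyard = 'shipyard' in services
--     return {
--         'has_jobs': 'jobs' in services,
--         'has_shops': bool(services & {'shop', 'cantina', 'housing'}),
--         'has_medical': 'medical' in services,
--         'has_repairs': has_shipyard,
--         'has_fuel': 'fuel' in services,
--         'has_upgrades': has_shipyard,
--         'has_shipyard': has_shipyard,
--         'has_federal_supplies': False,
--         'has_black_market': False,
--     }
-- ===== Notes on version B (the rewrite author's own statement) =====
-- stated objective: idiomatic
-- what changed: Replaces the mutating loop over service_list (dict initialised to False, per-item mapping lookup and in-place flag update, then a shipyard post-pass) with a single set built once and each flag computed directly as a membership/intersection test, shipyard implying repairs and upgrades at construction.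
import Mathlib
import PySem

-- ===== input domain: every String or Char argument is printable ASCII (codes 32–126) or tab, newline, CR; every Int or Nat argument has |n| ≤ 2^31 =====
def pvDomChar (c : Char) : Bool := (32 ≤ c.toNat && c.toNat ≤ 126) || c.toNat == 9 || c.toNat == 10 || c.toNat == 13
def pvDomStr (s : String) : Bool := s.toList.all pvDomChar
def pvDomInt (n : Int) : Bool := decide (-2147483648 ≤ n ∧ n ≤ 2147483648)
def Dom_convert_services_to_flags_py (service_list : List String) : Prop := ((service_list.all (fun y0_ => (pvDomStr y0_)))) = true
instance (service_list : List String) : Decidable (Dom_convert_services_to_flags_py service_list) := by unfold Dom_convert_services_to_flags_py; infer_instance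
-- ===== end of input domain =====

-- B replaces A's mutating loop (flag dict updated per item, then a shipyard post-pass) with one set
-- and a direct per-flag membership/intersection computation — no loop over the input (objective: idiomatic).


-- ===== PORT A =====
-- initial all-False flag dict
def pvInitFlags : PySem.Dict String Bool := PySem.Dict.mk
  [("has_jobs", false), ("has_shops", false), ("has_medical", false), ("has_repairs", false),
   ("has_fuel", false), ("has_upgrades", false), ("has_shipyard", false),
   ("has_federal_supplies", false), ("has_black_market", false)]

-- service_id -> database column mapping
def pvServiceMapping : PySem.Dict String String := PySem.Dict.mk
  [("jobs", "has_jobs"), ("shop", "has_shops"), ("medical", "has_medical"),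
   ("shipyard", "has_shipyard"), ("fuel", "has_fuel"), ("cantina", "has_shops"),
   ("housing", "has_shops")]

-- loop body: if service_id in service_mapping: service_flags[service_mapping[service_id]] = True
def pvStepA (flags : PySem.Dict String Bool) (service_id : String) : PySem.Dict String Bool :=
  match PySem.Dict.get? pvServiceMapping service_id with
  | some col => PySem.Dict.insert flags col true
  | none => flags

def convert_services_to_flags_py (service_list : List String) : List (String × Bool) :=
  let service_flags := service_list.foldl pvStepA pvInitFlags
  let service_flags :=
    if PySem.Dict.getD service_flags "has_shipyard" false then
      PySem.Dict.insert (PySem.Dict.insert service_flags "has_repairs" true) "has_upgrades" true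
    else service_flags
  service_flags.items

-- ===== PORT B =====
def convert_services_to_flags_py_alt (service_list : List String) : List (String × Bool) :=
  let services : PySem.Set String := PySem.Set.ofList service_list
  let has_shipyard := services.contains "shipyard"
  [("has_jobs", services.contains "jobs"),
   ("has_shops", decide (PySem.Set.inter services ["shop", "cantina", "housing"] ≠ [])),
   ("has_medical", services.contains "medical"),
   ("has_repairs", has_shipyard),
   ("has_fuel", services.contains "fuel"),
   ("has_upgrades", has_shipyard),
   ("has_shipyard", has_shipyard),
   ("has_federal_supplies", false),
   ("has_black_market", false)]

-- ===== PRECONDITION & SPEC =====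
def Spec_convert_services_to_flags_py (service_list : List String) (out : List (String × Bool)) : Prop := out = convert_services_to_flags_py_alt service_list
instance (service_list : List String) (out : List (String × Bool)) : Decidable (Spec_convert_services_to_flags_py service_list out) := by unfold Spec_convert_services_to_flags_py; infer_instance

-- ===== CLAIM (what is proved, stated in full; the proofs are below) =====
def Claim_equal_convert_services_to_flags_py : Prop := ∀ (service_list : List String), Dom_convert_services_to_flags_py service_list → Spec_convert_services_to_flags_py service_list (convert_services_to_flags_py service_list)

-- ===== LEMMAS AND PROOFS =====

-- the shape of A's flag dict: only the five mapped columns ever change before the post-pass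
def pvFlagsD (j s m rep f up sh : Bool) : PySem.Dict String Bool := PySem.Dict.mk
  [("has_jobs", j), ("has_shops", s), ("has_medical", m), ("has_repairs", rep),
   ("has_fuel", f), ("has_upgrades", up), ("has_shipyard", sh),
   ("has_federal_supplies", false), ("has_black_market", false)]

theorem pvStepA_flagsD (j s m rep f up sh : Bool) (x : String) :
    pvStepA (pvFlagsD j s m rep f up sh) x =
      pvFlagsD (j || "jobs" == x) (s || "shop" == x || "cantina" == x || "housing" == x)
        (m || "medical" == x) rep (f || "fuel" == x) up (sh || "shipyard" == x) := by
  have L : ∀ y : String, pvStepA (pvFlagsD j s m rep f up sh) y =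
      match PySem.Dict.get? pvServiceMapping y with
      | some col => PySem.Dict.insert (pvFlagsD j s m rep f up sh) col true
      | none => pvFlagsD j s m rep f up sh := fun _ => rfl
  by_cases h1 : "jobs" = x
  · subst h1; rw [L]; simp [pvServiceMapping, pvFlagsD, PySem.Dict.get?, PySem.Dict.insert]
  by_cases h2 : "shop" = x
  · subst h2; rw [L]; simp [pvServiceMapping, pvFlagsD, PySem.Dict.get?, PySem.Dict.insert]
  by_cases h3 : "medical" = x
  · subst h3; rw [L]; simp [pvServiceMapping, pvFlagsD, PySem.Dict.get?, PySem.Dict.insert]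
  by_cases h4 : "shipyard" = x
  · subst h4; rw [L]; simp [pvServiceMapping, pvFlagsD, PySem.Dict.get?, PySem.Dict.insert]
  by_cases h5 : "fuel" = x
  · subst h5; rw [L]; simp [pvServiceMapping, pvFlagsD, PySem.Dict.get?, PySem.Dict.insert]
  by_cases h6 : "cantina" = x
  · subst h6; rw [L]; simp [pvServiceMapping, pvFlagsD, PySem.Dict.get?, PySem.Dict.insert]
  by_cases h7 : "housing" = x
  · subst h7; rw [L]; simp [pvServiceMapping, pvFlagsD, PySem.Dict.get?, PySem.Dict.insert]
  · rw [L]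
    have e : ∀ (a : String), ¬ a = x → (a == x) = false :=
      fun a ha => beq_eq_false_iff_ne.mpr ha
    simp [pvServiceMapping, PySem.Dict.get?,
      e _ h1, e _ h2, e _ h3, e _ h4, e _ h5, e _ h6, e _ h7]

theorem pvFoldA (l : List String) (j s m rep f up sh : Bool) :
    l.foldl pvStepA (pvFlagsD j s m rep f up sh) =
      pvFlagsD (j || l.contains "jobs")
        (s || l.contains "shop" || l.contains "cantina" || l.contains "housing")
        (m || l.contains "medical") rep (f || l.contains "fuel") up
        (sh || l.contains "shipyard") := by
  induction l generalizing j s m f sh with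
  | nil => simp
  | cons x xs ih =>
      rw [List.foldl_cons, pvStepA_flagsD, ih]
      simp only [List.contains_cons, pvFlagsD, PySem.Dict.mk.injEq, List.cons.injEq,
        Prod.mk.injEq]
      repeat' apply And.intro
      all_goals first | rfl | trivial | ac_rfl

theorem pvInter3 (l : List String) :
    (PySem.Set.inter (PySem.Set.ofList l) ["shop", "cantina", "housing"] ≠ []) ↔
      ("shop" ∈ l ∨ "cantina" ∈ l ∨ "housing" ∈ l) := by
  constructor
  · intro h
    obtain ⟨x, hx⟩ := List.exists_mem_of_ne_nil _ h
    obtain ⟨hl, hr⟩ := (PySem.Set.mem_inter _ _ _).mp hx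
    have hl' := (PySem.Set.mem_ofList _ _).mp hl
    simp only [List.mem_cons, List.not_mem_nil, or_false] at hr
    rcases hr with rfl | rfl | rfl
    · exact Or.inl hl'
    · exact Or.inr (Or.inl hl')
    · exact Or.inr (Or.inr hl')
  · intro h _
    rcases h with h | h | h <;>
      exact absurd ‹_› (List.ne_nil_of_mem ((PySem.Set.mem_inter _ _ _).mpr
        ⟨(PySem.Set.mem_ofList _ _).mpr h, by simp⟩))

theorem pvAltB (l : List String) :
    convert_services_to_flags_py_alt l =
      [("has_jobs", l.contains "jobs"),
       ("has_shops", l.contains "shop" || l.contains "cantina" || l.contains "housing"),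
       ("has_medical", l.contains "medical"),
       ("has_repairs", l.contains "shipyard"),
       ("has_fuel", l.contains "fuel"),
       ("has_upgrades", l.contains "shipyard"),
       ("has_shipyard", l.contains "shipyard"),
       ("has_federal_supplies", false),
       ("has_black_market", false)] := by
  have hs : decide (PySem.Set.inter (PySem.Set.ofList l) ["shop", "cantina", "housing"] ≠ []) =
      (l.contains "shop" || l.contains "cantina" || l.contains "housing") := by
    rw [Bool.eq_iff_iff]; simp [pvInter3, or_assoc]
  simp [convert_services_to_flags_py_alt, hs]

-- ===== VERDICT (by name: the statement is the Claim_ definition above) =====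
theorem convert_services_to_flags_py_spec : Claim_equal_convert_services_to_flags_py := by
  intro l _
  unfold Spec_convert_services_to_flags_py
  simp only [convert_services_to_flags_py]
  rw [show pvInitFlags = pvFlagsD false false false false false false false from rfl, pvFoldA,
    pvAltB]
  simp only [Bool.false_or, pvFlagsD]
  by_cases h : "shipyard" ∈ l <;>
    simp [h, PySem.Dict.getD, PySem.Dict.get?, PySem.Dict.insert]
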